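-- pv_equiv track=rewrite | github.com/colinjianingxie/walletfreak | walletfreak/hotel_hunter/views.py | identify_user_cards
-- ===== SOURCE A (Python) =====
-- def identify_user_cards(user_cards):
--     """Identify key cards for portal logic."""
--     inventory = {
--         'has_amex_plat': False,
--         'has_amex_gold': False, # checking just in case
--         'has_chase_csr': False,
--         'has_chase_csp': False,
--         'has_chase_cip': False, # Ink Preferred
--         'has_capital_one_vx': False,
--     }
--
--     for c in user_cards:
--         name = c.get('name', '').lower()
--         issuer = c.get('issuer', '').lower()
--
--         if 'american express' in issuer or 'amex' in name:
--             if 'platinum' in name: inventory['has_amex_plat'] = True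
--             if 'gold' in name: inventory['has_amex_gold'] = True
--
--         if 'chase' in issuer:
--             if 'reserve' in name: inventory['has_chase_csr'] = True
--             if 'preferred' in name: inventory['has_chase_csp'] = True
--             if 'ink business preferred' in name: inventory['has_chase_cip'] = True
--
--         if 'venture x' in name: inventory['has_capital_one_vx'] = True
--
--     return inventory
-- ===== SOURCE B (Python) =====
-- def identify_user_cards(user_cards):
--     """Identify key cards for portal logic."""
--     return {
--         'has_amex_plat': any(
--             ('american express' in c.get('issuer', '').lower() or 'amex' in c.get('name', '').lower())
--             and 'platinum' in c.get('name', '').lower()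
--             for c in user_cards),
--         'has_amex_gold': any(
--             ('american express' in c.get('issuer', '').lower() or 'amex' in c.get('name', '').lower())
--             and 'gold' in c.get('name', '').lower()
--             for c in user_cards),
--         'has_chase_csr': any(
--             'chase' in c.get('issuer', '').lower() and 'reserve' in c.get('name', '').lower()
--             for c in user_cards),
--         'has_chase_csp': any(
--             'chase' in c.get('issuer', '').lower() and 'preferred' in c.get('name', '').lower()
--             for c in user_cards),
--         'has_chase_cip': any(
--             'chase' in c.get('issuer', '').lower() and 'ink business preferred' in c.get('name', '').lower()
--             for c in user_cards),
--         'has_capital_one_vx': any(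
--             'venture x' in c.get('name', '').lower()
--             for c in user_cards),
--     }
-- ===== Notes on version B (the rewrite author's own statement) =====
-- stated objective: idiomatic
-- what changed: Replaced the single accumulating pass that mutates a flag dict with a dict literal of six independent any(...) scans over user_cards, one per flag.
import Mathlib
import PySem

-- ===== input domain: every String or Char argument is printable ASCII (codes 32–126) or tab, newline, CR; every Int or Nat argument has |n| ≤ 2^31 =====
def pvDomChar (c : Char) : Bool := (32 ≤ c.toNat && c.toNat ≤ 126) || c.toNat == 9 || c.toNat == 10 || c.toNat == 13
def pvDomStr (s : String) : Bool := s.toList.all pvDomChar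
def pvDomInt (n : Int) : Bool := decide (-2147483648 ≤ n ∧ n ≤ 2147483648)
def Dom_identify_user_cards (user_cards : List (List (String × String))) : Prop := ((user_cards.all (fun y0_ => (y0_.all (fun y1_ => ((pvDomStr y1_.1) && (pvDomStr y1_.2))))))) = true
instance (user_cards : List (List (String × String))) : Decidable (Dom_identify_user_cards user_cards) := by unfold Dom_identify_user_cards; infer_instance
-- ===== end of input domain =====

-- B replaces A's single accumulating pass over a mutable flag dict with a dict
-- literal whose six values are independent any(...) scans (objective: idiomatic).

-- ===== PORT A =====
-- one loop iteration of A's for-loop, mutating the inventory dict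
def pvStepA (inv : PySem.Dict String Bool) (c : List (String × String)) : PySem.Dict String Bool :=
  let name := PySem.Str.lower ((PySem.Dict.mk c).getD "name" "")
  let issuer := PySem.Str.lower ((PySem.Dict.mk c).getD "issuer" "")
  let inv :=
    if PySem.Str.isIn "american express" issuer || PySem.Str.isIn "amex" name then
      let inv := if PySem.Str.isIn "platinum" name then inv.insert "has_amex_plat" true else inv
      let inv := if PySem.Str.isIn "gold" name then inv.insert "has_amex_gold" true else inv
      inv
    else inv
  let inv :=
    if PySem.Str.isIn "chase" issuer then
      let inv := if PySem.Str.isIn "reserve" name then inv.insert "has_chase_csr" true else inv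
      let inv := if PySem.Str.isIn "preferred" name then inv.insert "has_chase_csp" true else inv
      let inv := if PySem.Str.isIn "ink business preferred" name then inv.insert "has_chase_cip" true else inv
      inv
    else inv
  if PySem.Str.isIn "venture x" name then inv.insert "has_capital_one_vx" true else inv

def identify_user_cards (user_cards : List (List (String × String))) : List (String × Bool) :=
  let inventory : PySem.Dict String Bool := PySem.Dict.ofList
    [("has_amex_plat", false), ("has_amex_gold", false), ("has_chase_csr", false),
     ("has_chase_csp", false), ("has_chase_cip", false), ("has_capital_one_vx", false)]
  (user_cards.foldl pvStepA inventory).items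

-- ===== PORT B =====
def identify_user_cards_alt (user_cards : List (List (String × String))) : List (String × Bool) :=
  [("has_amex_plat", user_cards.any (fun c =>
      (PySem.Str.isIn "american express" (PySem.Str.lower ((PySem.Dict.mk c).getD "issuer" ""))
        || PySem.Str.isIn "amex" (PySem.Str.lower ((PySem.Dict.mk c).getD "name" "")))
      && PySem.Str.isIn "platinum" (PySem.Str.lower ((PySem.Dict.mk c).getD "name" "")))),
   ("has_amex_gold", user_cards.any (fun c =>
      (PySem.Str.isIn "american express" (PySem.Str.lower ((PySem.Dict.mk c).getD "issuer" ""))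
        || PySem.Str.isIn "amex" (PySem.Str.lower ((PySem.Dict.mk c).getD "name" "")))
      && PySem.Str.isIn "gold" (PySem.Str.lower ((PySem.Dict.mk c).getD "name" "")))),
   ("has_chase_csr", user_cards.any (fun c =>
      PySem.Str.isIn "chase" (PySem.Str.lower ((PySem.Dict.mk c).getD "issuer" ""))
      && PySem.Str.isIn "reserve" (PySem.Str.lower ((PySem.Dict.mk c).getD "name" "")))),
   ("has_chase_csp", user_cards.any (fun c =>
      PySem.Str.isIn "chase" (PySem.Str.lower ((PySem.Dict.mk c).getD "issuer" ""))
      && PySem.Str.isIn "preferred" (PySem.Str.lower ((PySem.Dict.mk c).getD "name" "")))),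
   ("has_chase_cip", user_cards.any (fun c =>
      PySem.Str.isIn "chase" (PySem.Str.lower ((PySem.Dict.mk c).getD "issuer" ""))
      && PySem.Str.isIn "ink business preferred" (PySem.Str.lower ((PySem.Dict.mk c).getD "name" "")))),
   ("has_capital_one_vx", user_cards.any (fun c =>
      PySem.Str.isIn "venture x" (PySem.Str.lower ((PySem.Dict.mk c).getD "name" ""))))]

-- ===== PRECONDITION & SPEC =====
def Spec_identify_user_cards (user_cards : List (List (String × String))) (out : List (String × Bool)) : Prop := out = identify_user_cards_alt user_cards
instance (user_cards : List (List (String × String))) (out : List (String × Bool)) : Decidable (Spec_identify_user_cards user_cards out) := by unfold Spec_identify_user_cards; infer_instance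

-- ===== CLAIM (what is proved, stated in full; the proofs are below) =====
def Claim_equal_identify_user_cards : Prop := ∀ (user_cards : List (List (String × String))), Dom_identify_user_cards user_cards → Spec_identify_user_cards user_cards (identify_user_cards user_cards)

-- ===== LEMMAS AND PROOFS =====

theorem pvIns0 (a b c d e f v : Bool) :
    (PySem.Dict.mk [("has_amex_plat", a), ("has_amex_gold", b), ("has_chase_csr", c), ("has_chase_csp", d), ("has_chase_cip", e), ("has_capital_one_vx", f)]).insert "has_amex_plat" v = PySem.Dict.mk [("has_amex_plat", v), ("has_amex_gold", b), ("has_chase_csr", c), ("has_chase_csp", d), ("has_chase_cip", e), ("has_capital_one_vx", f)] := by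
  simp [PySem.Dict.insert, PySem.Dict.contains]

theorem pvIns1 (a b c d e f v : Bool) :
    (PySem.Dict.mk [("has_amex_plat", a), ("has_amex_gold", b), ("has_chase_csr", c), ("has_chase_csp", d), ("has_chase_cip", e), ("has_capital_one_vx", f)]).insert "has_amex_gold" v = PySem.Dict.mk [("has_amex_plat", a), ("has_amex_gold", v), ("has_chase_csr", c), ("has_chase_csp", d), ("has_chase_cip", e), ("has_capital_one_vx", f)] := by
  simp [PySem.Dict.insert, PySem.Dict.contains]

theorem pvIns2 (a b c d e f v : Bool) :
    (PySem.Dict.mk [("has_amex_plat", a), ("has_amex_gold", b), ("has_chase_csr", c), ("has_chase_csp", d), ("has_chase_cip", e), ("has_capital_one_vx", f)]).insert "has_chase_csr" v = PySem.Dict.mk [("has_amex_plat", a), ("has_amex_gold", b), ("has_chase_csr", v), ("has_chase_csp", d), ("has_chase_cip", e), ("has_capital_one_vx", f)] := by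
  simp [PySem.Dict.insert, PySem.Dict.contains]

theorem pvIns3 (a b c d e f v : Bool) :
    (PySem.Dict.mk [("has_amex_plat", a), ("has_amex_gold", b), ("has_chase_csr", c), ("has_chase_csp", d), ("has_chase_cip", e), ("has_capital_one_vx", f)]).insert "has_chase_csp" v = PySem.Dict.mk [("has_amex_plat", a), ("has_amex_gold", b), ("has_chase_csr", c), ("has_chase_csp", v), ("has_chase_cip", e), ("has_capital_one_vx", f)] := by
  simp [PySem.Dict.insert, PySem.Dict.contains]

theorem pvIns4 (a b c d e f v : Bool) :
    (PySem.Dict.mk [("has_amex_plat", a), ("has_amex_gold", b), ("has_chase_csr", c), ("has_chase_csp", d), ("has_chase_cip", e), ("has_capital_one_vx", f)]).insert "has_chase_cip" v = PySem.Dict.mk [("has_amex_plat", a), ("has_amex_gold", b), ("has_chase_csr", c), ("has_chase_csp", d), ("has_chase_cip", v), ("has_capital_one_vx", f)] := by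
  simp [PySem.Dict.insert, PySem.Dict.contains]

theorem pvIns5 (a b c d e f v : Bool) :
    (PySem.Dict.mk [("has_amex_plat", a), ("has_amex_gold", b), ("has_chase_csr", c), ("has_chase_csp", d), ("has_chase_cip", e), ("has_capital_one_vx", f)]).insert "has_capital_one_vx" v = PySem.Dict.mk [("has_amex_plat", a), ("has_amex_gold", b), ("has_chase_csr", c), ("has_chase_csp", d), ("has_chase_cip", e), ("has_capital_one_vx", v)] := by
  simp [PySem.Dict.insert, PySem.Dict.contains]

-- one step of A's loop on the literal inventory dict ORs each flag with its predicate on hd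
theorem pvStepA_mk (hd : List (String × String)) (a b c d e f : Bool) :
    pvStepA (PySem.Dict.mk
      [("has_amex_plat", a), ("has_amex_gold", b), ("has_chase_csr", c),
       ("has_chase_csp", d), ("has_chase_cip", e), ("has_capital_one_vx", f)]) hd =
    PySem.Dict.mk
      [("has_amex_plat", a ||
        ((PySem.Str.isIn "american express" (PySem.Str.lower ((PySem.Dict.mk hd).getD "issuer" ""))
          || PySem.Str.isIn "amex" (PySem.Str.lower ((PySem.Dict.mk hd).getD "name" "")))
        && PySem.Str.isIn "platinum" (PySem.Str.lower ((PySem.Dict.mk hd).getD "name" "")))),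
       ("has_amex_gold", b ||
        ((PySem.Str.isIn "american express" (PySem.Str.lower ((PySem.Dict.mk hd).getD "issuer" ""))
          || PySem.Str.isIn "amex" (PySem.Str.lower ((PySem.Dict.mk hd).getD "name" "")))
        && PySem.Str.isIn "gold" (PySem.Str.lower ((PySem.Dict.mk hd).getD "name" "")))),
       ("has_chase_csr", c ||
        (PySem.Str.isIn "chase" (PySem.Str.lower ((PySem.Dict.mk hd).getD "issuer" ""))
        && PySem.Str.isIn "reserve" (PySem.Str.lower ((PySem.Dict.mk hd).getD "name" "")))),
       ("has_chase_csp", d ||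
        (PySem.Str.isIn "chase" (PySem.Str.lower ((PySem.Dict.mk hd).getD "issuer" ""))
        && PySem.Str.isIn "preferred" (PySem.Str.lower ((PySem.Dict.mk hd).getD "name" "")))),
       ("has_chase_cip", e ||
        (PySem.Str.isIn "chase" (PySem.Str.lower ((PySem.Dict.mk hd).getD "issuer" ""))
        && PySem.Str.isIn "ink business preferred" (PySem.Str.lower ((PySem.Dict.mk hd).getD "name" "")))),
       ("has_capital_one_vx", f ||
        (PySem.Str.isIn "venture x" (PySem.Str.lower ((PySem.Dict.mk hd).getD "name" ""))))] := by
  simp only [pvStepA]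
  generalize PySem.Str.lower ((PySem.Dict.mk hd).getD "name" "") = nm
  generalize PySem.Str.lower ((PySem.Dict.mk hd).getD "issuer" "") = iss
  generalize PySem.Str.isIn "american express" iss = q1
  generalize PySem.Str.isIn "amex" nm = q2
  generalize PySem.Str.isIn "platinum" nm = q3
  generalize PySem.Str.isIn "gold" nm = q4
  generalize PySem.Str.isIn "chase" iss = q5
  generalize PySem.Str.isIn "reserve" nm = q6
  generalize PySem.Str.isIn "preferred" nm = q7
  generalize PySem.Str.isIn "ink business preferred" nm = q8
  generalize PySem.Str.isIn "venture x" nm = q9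
  cases q1 <;> cases q2 <;> cases q3 <;> cases q4 <;> cases q5 <;> cases q6 <;> cases q7 <;> cases q8 <;> cases q9 <;>
    simp [pvIns0, pvIns1, pvIns2, pvIns3, pvIns4, pvIns5]

-- loop invariant: folding A's step over any start values yields each flag ORed with its any(...)
theorem pvFoldA_items (cards : List (List (String × String))) :
    ∀ a b c d e f : Bool,
    (cards.foldl pvStepA (PySem.Dict.mk
      [("has_amex_plat", a), ("has_amex_gold", b), ("has_chase_csr", c),
       ("has_chase_csp", d), ("has_chase_cip", e), ("has_capital_one_vx", f)])).items =
    [("has_amex_plat", a || cards.any (fun x =>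
        (PySem.Str.isIn "american express" (PySem.Str.lower ((PySem.Dict.mk x).getD "issuer" ""))
          || PySem.Str.isIn "amex" (PySem.Str.lower ((PySem.Dict.mk x).getD "name" "")))
        && PySem.Str.isIn "platinum" (PySem.Str.lower ((PySem.Dict.mk x).getD "name" "")))),
     ("has_amex_gold", b || cards.any (fun x =>
        (PySem.Str.isIn "american express" (PySem.Str.lower ((PySem.Dict.mk x).getD "issuer" ""))
          || PySem.Str.isIn "amex" (PySem.Str.lower ((PySem.Dict.mk x).getD "name" "")))
        && PySem.Str.isIn "gold" (PySem.Str.lower ((PySem.Dict.mk x).getD "name" "")))),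
     ("has_chase_csr", c || cards.any (fun x =>
        PySem.Str.isIn "chase" (PySem.Str.lower ((PySem.Dict.mk x).getD "issuer" ""))
        && PySem.Str.isIn "reserve" (PySem.Str.lower ((PySem.Dict.mk x).getD "name" "")))),
     ("has_chase_csp", d || cards.any (fun x =>
        PySem.Str.isIn "chase" (PySem.Str.lower ((PySem.Dict.mk x).getD "issuer" ""))
        && PySem.Str.isIn "preferred" (PySem.Str.lower ((PySem.Dict.mk x).getD "name" "")))),
     ("has_chase_cip", e || cards.any (fun x =>
        PySem.Str.isIn "chase" (PySem.Str.lower ((PySem.Dict.mk x).getD "issuer" ""))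
        && PySem.Str.isIn "ink business preferred" (PySem.Str.lower ((PySem.Dict.mk x).getD "name" "")))),
     ("has_capital_one_vx", f || cards.any (fun x =>
        PySem.Str.isIn "venture x" (PySem.Str.lower ((PySem.Dict.mk x).getD "name" ""))))] := by
  induction cards with
  | nil => intro a b c d e f; simp
  | cons hd tl ih =>
    intro a b c d e f
    simp only [List.foldl_cons, List.any_cons, pvStepA_mk, ih, Bool.or_assoc]

-- ===== VERDICT (by name: the statement is the Claim_ definition above) =====
theorem identify_user_cards_spec : Claim_equal_identify_user_cards := by
  intro user_cards _
  unfold Spec_identify_user_cards identify_user_cards identify_user_cards_alt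
  rw [show (PySem.Dict.ofList
    [("has_amex_plat", false), ("has_amex_gold", false), ("has_chase_csr", false),
     ("has_chase_csp", false), ("has_chase_cip", false), ("has_capital_one_vx", false)]) =
    PySem.Dict.mk
    [("has_amex_plat", false), ("has_amex_gold", false), ("has_chase_csr", false),
     ("has_chase_csp", false), ("has_chase_cip", false), ("has_capital_one_vx", false)] from by decide]
  rw [pvFoldA_items]
  simp
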